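-- pv_equiv track=rewrite | github.com/SubhPB/leet-code | src/app/2025/Oct/W2.py | minTimeOptimal
-- ===== SOURCE A (Python) =====
-- from typing import List
--
-- def minTimeOptimal(skill: List[int], mana: List[int]) -> int:
--     n=len(skill);nums=[0]*n
--     for i,potion in enumerate(mana):
--         if not i:
--             for j,ws in enumerate(skill):
--                 nums[j]=ws*potion+nums[j-1]
--         else:
--             for j,ws in enumerate(skill):
--                 if not j:
--                     nums[j]+=potion*ws
--                 else:
--                     nums[j]=max(nums[j],nums[j-1])+potion*ws
--             for j in range(n-2,-1,-1):
--                 nums[j]=nums[j+1]-potion*skill[j+1]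
--     return nums[-1]
-- ===== SOURCE B (Python) =====
-- def minTimeOptimal(skill, mana):
--     if not mana:
--         return 0
--     prefix = []
--     t = 0
--     for s in skill:
--         t += s
--         prefix.append(t)
--     done = [p * mana[0] for p in prefix]
--     for m in mana[1:]:
--         start = done[0]
--         for k in range(1, len(skill)):
--             start = max(start, done[k] - prefix[k - 1] * m)
--         done = [start + p * m for p in prefix]
--     return done[-1]
-- ===== Notes on version B (the rewrite author's own statement) =====
-- stated objective: alternative
-- what changed: Replaces A's in-place forward-max pass followed by a backward correction pass over nums with a precomputed prefix-sum table and, per potion, a single max scan computing start = max_k(done[k] - prefix[k-1]*m) from which the done array is rebuilt directly.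
import Mathlib
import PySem

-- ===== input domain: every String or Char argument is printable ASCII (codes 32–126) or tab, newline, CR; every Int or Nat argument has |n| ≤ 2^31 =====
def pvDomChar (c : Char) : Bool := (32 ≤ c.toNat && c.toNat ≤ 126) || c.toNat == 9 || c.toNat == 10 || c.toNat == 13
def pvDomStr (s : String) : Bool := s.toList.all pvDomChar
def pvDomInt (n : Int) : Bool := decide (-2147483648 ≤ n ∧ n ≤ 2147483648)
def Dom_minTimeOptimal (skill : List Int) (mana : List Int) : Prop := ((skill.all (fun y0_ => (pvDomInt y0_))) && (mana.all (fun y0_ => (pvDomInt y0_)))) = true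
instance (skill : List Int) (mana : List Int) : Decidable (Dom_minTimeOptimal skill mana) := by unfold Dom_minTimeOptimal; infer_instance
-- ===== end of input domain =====

-- B replaces A's forward-max-then-backward-correction passes by a pfx-sum table and a
-- single max scan per potion (objective: alternative decomposition, same asymptotic cost).

-- ===== PORT A =====
-- literal transliteration of A: nums is the mutated list, enumerate loops become foldl,
-- Python indexing (incl. negative nums[j-1], nums[-1]) via PySem; the getD 0 default is
-- never hit on Pre_ (skill ≠ []) inputs.
def minTimeOptimal (skill : List Int) (mana : List Int) : Int :=
  let n : Int := skill.length
  let nums0 : List Int := List.replicate skill.length 0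
  let nums := (PySem.List.enumerate mana).foldl (fun nums ip =>
    let i := ip.1
    let potion := ip.2
    if i == 0 then
      (PySem.List.enumerate skill).foldl (fun nums jw =>
        PySem.List.pySetD nums jw.1 (jw.2 * potion + PySem.List.pyGetD nums (jw.1 - 1) 0)) nums
    else
      let nums := (PySem.List.enumerate skill).foldl (fun nums jw =>
        if jw.1 == 0 then
          PySem.List.pySetD nums jw.1 (PySem.List.pyGetD nums jw.1 0 + potion * jw.2)
        else
          PySem.List.pySetD nums jw.1
            (max (PySem.List.pyGetD nums jw.1 0) (PySem.List.pyGetD nums (jw.1 - 1) 0) + potion * jw.2)) nums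
      (PySem.List.pyRange (n - 2) (-1) (-1)).foldl (fun nums j =>
        PySem.List.pySetD nums j
          (PySem.List.pyGetD nums (j + 1) 0 - potion * PySem.List.pyGetD skill (j + 1) 0)) nums) nums0
  PySem.List.pyGetD nums (-1) 0

-- ===== PORT B =====
-- literal transliteration of Source B: pfx built by one loop, done rebuilt per potion from
-- start = max over k of done[k] - pfx[k-1]*m.
def minTimeOptimal_alt (skill : List Int) (mana : List Int) : Int :=
  match mana with
  | [] => 0
  | m0 :: rest =>
    let pfx := (skill.foldl (fun (acc : List Int × Int) s => (acc.1 ++ [acc.2 + s], acc.2 + s)) ([], 0)).1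
    let done := pfx.map (fun p => p * m0)
    let done := rest.foldl (fun done m =>
      let start := (PySem.List.pyRange 1 (skill.length : Int) 1).foldl
        (fun start k =>
          max start (PySem.List.pyGetD done k 0 - PySem.List.pyGetD pfx (k - 1) 0 * m))
        (PySem.List.pyGetD done 0 0)
      pfx.map (fun p => start + p * m)) done
    PySem.List.pyGetD done (-1) 0

-- ===== PRECONDITION & SPEC =====
-- A evaluates nums[-1] (and B done[0]) on an empty skill list: Pre_ excludes exactly the
-- inputs with skill = [], on which A raises IndexError.
def Pre_minTimeOptimal (skill : List Int) (mana : List Int) : Prop := skill ≠ []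
instance (skill : List Int) (mana : List Int) : Decidable (Pre_minTimeOptimal skill mana) := by
  unfold Pre_minTimeOptimal; infer_instance

def pvWitness_minTimeOptimal : List Int × List Int := ([1, 5, 2, 4], [5, 1, 4, 2])

def Spec_minTimeOptimal (skill : List Int) (mana : List Int) (out : Int) : Prop := out = minTimeOptimal_alt skill mana
instance (skill : List Int) (mana : List Int) (out : Int) : Decidable (Spec_minTimeOptimal skill mana out) := by
  unfold Spec_minTimeOptimal; infer_instance

-- ===== CLAIM (what is proved, stated in full; the proofs are below) =====
def Claim_equal_minTimeOptimal : Prop := ∀ (skill : List Int) (mana : List Int), Dom_minTimeOptimal skill mana → Pre_minTimeOptimal skill mana → Spec_minTimeOptimal skill mana (minTimeOptimal skill mana)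


-- ===== LEMMAS AND PROOFS =====

-- pfx sums of sk starting from accumulator t (the contents of Source B's `pfx` list)
def prefAux (t : Int) : List Int → List Int
  | [] => []
  | s :: ss => (t + s) :: prefAux (t + s) ss

theorem length_prefAux (t : Int) (sk : List Int) : (prefAux t sk).length = sk.length := by
  induction sk generalizing t with
  | nil => rfl
  | cons s ss ih => simp [prefAux, ih]

theorem bprefix_fold (sk : List Int) : ∀ (l : List Int) (t : Int),
    sk.foldl (fun (acc : List Int × Int) s => (acc.1 ++ [acc.2 + s], acc.2 + s)) (l, t)
      = (l ++ prefAux t sk, t + sk.sum) := by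
  induction sk with
  | nil => intro l t; simp [prefAux]
  | cons s ss ih =>
    intro l t
    simp only [List.foldl_cons, List.sum_cons, prefAux]
    rw [ih]
    simp only [Prod.mk.injEq]
    exact ⟨by simp, by ring⟩

-- small list-surgery helpers used by the loop lemmas
theorem set_append_len {α : Type} (acc : List α) (r v : α) (rest : List α) :
    (acc ++ r :: rest).set acc.length v = acc ++ v :: rest := by
  induction acc with
  | nil => rfl
  | cons a t ih => simpa [List.set] using ih

theorem getD_append_len {α : Type} (acc : List α) (r : α) (rest : List α) (d : α) :
    (acc ++ r :: rest).getD acc.length d = r := by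
  induction acc with
  | nil => rfl
  | cons a t ih => simpa [List.getD] using ih

theorem getD_append_lt {α : Type} (acc rest : List α) (n : Nat) (d : α) (h : n < acc.length) :
    (acc ++ rest).getD n d = acc.getD n d := by
  induction acc generalizing n with
  | nil => simp at h
  | cons a t ih =>
    cases n with
    | zero => rfl
    | succ k => simpa [List.getD] using ih k (by simpa using h)

theorem getD_pred_eq_getLastD {α : Type} (l : List α) (h : l ≠ []) (d : α) :
    l.getD (l.length - 1) d = l.getLastD d := by
  induction l with
  | nil => exact absurd rfl h
  | cons a t ih =>
    cases t with
    | nil => rfl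
    | cons b u =>
      have h2 : (b :: u) ≠ [] := by simp
      have := ih h2
      simpa [List.getD, List.getLastD, Nat.succ_sub_one] using this

theorem drop_pred_eq_getLastD {α : Type} (l : List α) (h : l ≠ []) (d : α) :
    l.drop (l.length - 1) = [l.getLastD d] := by
  induction l with
  | nil => exact absurd rfl h
  | cons a t ih =>
    cases t with
    | nil => rfl
    | cons b u =>
      have h2 : (b :: u) ≠ [] := by simp
      have := ih h2
      simpa [List.getLastD, Nat.succ_sub_one] using this

-- state of A's first inner loop (i = 0): nums[j] = ws*m + nums[j-1]
def firstL (m c : Int) : List Int → List Int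
  | [] => []
  | s :: ss => (s * m + c) :: firstL m (s * m + c) ss

theorem first_go (m : Int) (sk : List Int) : ∀ (acc rest : List Int),
    acc ≠ [] → rest.length = sk.length →
    (PySem.List.enumerate sk (acc.length : Int)).foldl
      (fun nums jw => PySem.List.pySetD nums jw.1 (jw.2 * m + PySem.List.pyGetD nums (jw.1 - 1) 0))
      (acc ++ rest)
      = acc ++ firstL m (acc.getLastD 0) sk := by
  intro acc rest hacc hl
  induction sk generalizing acc rest with
  | nil =>
    have : rest = [] := List.eq_nil_of_length_eq_zero (by simpa using hl)
    subst this
    simp [PySem.List.enumerate_nil, firstL]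
  | cons s ss ih =>
    obtain ⟨r, rest', rfl⟩ : ∃ r rest', rest = r :: rest' := by
      cases rest with
      | nil => simp at hl
      | cons r rest' => exact ⟨r, rest', rfl⟩
    have hlen1 : 1 ≤ acc.length := List.length_pos_of_ne_nil hacc
    rw [PySem.List.enumerate_cons, List.foldl_cons]
    have hidx : (acc.length : Int) - 1 = ((acc.length - 1 : Nat) : Int) := by push_cast [hlen1]; ring
    rw [hidx, PySem.List.pyGetD_natCast, PySem.List.pySetD_natCast,
        getD_append_lt _ _ _ _ (by omega), getD_pred_eq_getLastD _ hacc,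
        set_append_len]
    have hcast : (acc.length : Int) + 1 = (((acc ++ [s * m + acc.getLastD 0]).length : Nat) : Int) := by
      push_cast; simp
    rw [hcast, List.append_cons]
    exact (ih (acc ++ [s * m + acc.getLastD 0]) rest' (by simp) (by simpa using hl)).trans
      (by simp [firstL, List.getLastD_concat])

theorem firstL_pref (m : Int) (sk : List Int) : ∀ (t : Int),
    firstL m (t * m) sk = (prefAux t sk).map (fun p => p * m) := by
  induction sk with
  | nil => intro t; rfl
  | cons s ss ih =>
    intro t
    simp only [firstL, prefAux, List.map_cons]
    have h : s * m + t * m = (t + s) * m := by ring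
    rw [h, ih]

-- state of A's forward pass (i ≥ 1, j ≥ 1): nums[j] = max(nums[j], nums[j-1]) + m*s
def fwdL (m c : Int) : List (Int × Int) → List Int
  | [] => []
  | sr :: t => (max sr.2 c + m * sr.1) :: fwdL m (max sr.2 c + m * sr.1) t

theorem fwd_go (m : Int) (sk : List Int) : ∀ (acc rest : List Int),
    acc ≠ [] → rest.length = sk.length →
    (PySem.List.enumerate sk (acc.length : Int)).foldl
      (fun nums jw =>
        if jw.1 == 0 then
          PySem.List.pySetD nums jw.1 (PySem.List.pyGetD nums jw.1 0 + m * jw.2)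
        else
          PySem.List.pySetD nums jw.1
            (max (PySem.List.pyGetD nums jw.1 0) (PySem.List.pyGetD nums (jw.1 - 1) 0) + m * jw.2))
      (acc ++ rest)
      = acc ++ fwdL m (acc.getLastD 0) (sk.zip rest) := by
  intro acc rest hacc hl
  induction sk generalizing acc rest with
  | nil =>
    have : rest = [] := List.eq_nil_of_length_eq_zero (by simpa using hl)
    subst this
    simp [PySem.List.enumerate_nil, fwdL]
  | cons s ss ih =>
    obtain ⟨r, rest', rfl⟩ : ∃ r rest', rest = r :: rest' := by
      cases rest with
      | nil => simp at hl
      | cons r rest' => exact ⟨r, rest', rfl⟩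
    have hlen1 : 1 ≤ acc.length := List.length_pos_of_ne_nil hacc
    rw [PySem.List.enumerate_cons, List.foldl_cons]
    have hif : (((acc.length : Int), s).1 == 0) = false := by
      simp only [beq_eq_false_iff_ne, ne_eq]
      intro h
      have : acc.length = 0 := by exact_mod_cast h
      omega
    rw [hif]
    simp only [Bool.false_eq_true, if_false]
    have hidx : (acc.length : Int) - 1 = ((acc.length - 1 : Nat) : Int) := by omega
    rw [hidx, PySem.List.pyGetD_natCast, PySem.List.pyGetD_natCast, PySem.List.pySetD_natCast,
        getD_append_len, getD_append_lt _ _ _ _ (by omega), getD_pred_eq_getLastD _ hacc,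
        set_append_len]
    have hcast : (acc.length : Int) + 1
        = (((acc ++ [max r (acc.getLastD 0) + m * s]).length : Nat) : Int) := by
      push_cast; simp
    rw [hcast, List.append_cons]
    exact (ih (acc ++ [max r (acc.getLastD 0) + m * s]) rest' (by simp) (by simpa using hl)).trans
      (by simp [fwdL])

theorem length_fwdL (m c : Int) (ps : List (Int × Int)) : (fwdL m c ps).length = ps.length := by
  induction ps generalizing c with
  | nil => rfl
  | cons p t ih => simp [fwdL, ih]

theorem getLast?_cons_fwdL (m : Int) (ps : List (Int × Int)) : ∀ (c : Int),
    (c :: fwdL m c ps).getLast? = some (ps.foldl (fun c sr => max sr.2 c + m * sr.1) c) := by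
  induction ps with
  | nil => intro c; rfl
  | cons p t ih => intro c; simpa [fwdL] using ih _

-- the terms B's max scan compares: done[k] - pfx[k-1]*m, with the pfx value carried along
def annP (m P : Int) : List (Int × Int) → List Int
  | [] => []
  | sr :: t => (sr.2 - P * m) :: annP m (P + sr.1) t

theorem fold_rel (m : Int) (ps : List (Int × Int)) : ∀ (st P : Int),
    ps.foldl (fun c sr => max sr.2 c + m * sr.1) (st + m * P)
      = (annP m P ps).foldl max st + m * (P + (ps.map Prod.fst).sum) := by
  induction ps with
  | nil => intro st P; simp [annP]
  | cons sr t ih =>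
    intro st P
    simp only [List.foldl_cons, annP, List.map_cons, List.sum_cons]
    have h1 : max sr.2 (st + m * P) + m * sr.1 = max st (sr.2 - P * m) + m * (P + sr.1) := by
      rcases le_total sr.2 (st + m * P) with h | h
      · rw [max_eq_right h, max_eq_left (by linarith)]; ring
      · rw [max_eq_left h, max_eq_right (by linarith)]; ring
    rw [h1, ih]
    ring

theorem bstart_go (m : Int) (ss' : List Int) : ∀ (ds' dpre ppre : List Int) (P st : Int),
    ds'.length = ss'.length → dpre.length = ppre.length → ppre.getLast? = some P →
    (PySem.List.pyRange (dpre.length : Int) ((dpre.length : Int) + ss'.length) 1).foldl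
      (fun st k =>
        max st (PySem.List.pyGetD (dpre ++ ds') k 0 - PySem.List.pyGetD (ppre ++ prefAux P ss') (k - 1) 0 * m))
      st
      = (annP m P (ss'.zip ds')).foldl max st := by
  induction ss' with
  | nil =>
    intro ds' dpre ppre P st hl _ _
    have : ds' = [] := List.eq_nil_of_length_eq_zero (by simpa using hl)
    subst this
    rw [PySem.List.pyRange_one_eq_nil (by simp)]
    rfl
  | cons s sst ih =>
    intro ds' dpre ppre P st hl hlp hlast
    obtain ⟨r, dst, rfl⟩ : ∃ r dst, ds' = r :: dst := by
      cases ds' with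
      | nil => simp at hl
      | cons r dst => exact ⟨r, dst, rfl⟩
    have hppre : ppre ≠ [] := by
      intro h; subst h; simp at hlast
    have hlen1 : 1 ≤ ppre.length := List.length_pos_of_ne_nil hppre
    have hlt : (dpre.length : Int) < (dpre.length : Int) + (((s :: sst).length : Nat) : Int) := by
      simp
    rw [PySem.List.pyRange_one_cons hlt, List.foldl_cons]
    have hidx : (dpre.length : Int) - 1 = ((ppre.length - 1 : Nat) : Int) := by rw [hlp]; omega
    have hP : ppre.getLastD 0 = P := by
      rw [List.getLastD_eq_getLast?, hlast]; rfl
    rw [hidx, PySem.List.pyGetD_natCast, PySem.List.pyGetD_natCast, getD_append_len,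
        getD_append_lt _ _ _ _ (by omega), getD_pred_eq_getLastD _ hppre, hP]
    rw [show prefAux P (s :: sst) = (P + s) :: prefAux (P + s) sst from rfl]
    rw [show ppre ++ (P + s) :: prefAux (P + s) sst
          = (ppre ++ [P + s]) ++ prefAux (P + s) sst by simp]
    rw [show dpre ++ r :: dst = (dpre ++ [r]) ++ dst by simp]
    have hcast : (dpre.length : Int) + 1 = (((dpre ++ [r]).length : Nat) : Int) := by
      push_cast; simp
    have hub : (dpre.length : Int) + ((s :: sst).length : Nat)
        = ((dpre ++ [r]).length : Int) + (sst.length : Nat) := by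
      push_cast; simp; omega
    rw [hcast, hub,
        ih dst (dpre ++ [r]) (ppre ++ [P + s]) (P + s) (max st (r - P * m))
          (by simpa using hl) (by simp [hlp]) (by simp)]
    rfl

theorem prefAux_getD_succ (sk : List Int) : ∀ (t : Int) (k : Nat), k + 1 < sk.length →
    (prefAux t sk).getD (k + 1) 0 = (prefAux t sk).getD k 0 + sk.getD (k + 1) 0 := by
  induction sk with
  | nil => intro t k h; simp at h
  | cons s ss ih =>
    intro t k h
    cases k with
    | zero =>
      cases ss with
      | nil => simp at h
      | cons s2 ss2 => simp [prefAux]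
    | succ k2 =>
      simp only [prefAux, List.getD_cons_succ]
      exact ih (t + s) k2 (by simpa using h)

theorem prefAux_getLast? (sk : List Int) : ∀ (t : Int), sk ≠ [] →
    (prefAux t sk).getLast? = some (t + sk.sum) := by
  induction sk with
  | nil => intro t h; exact absurd rfl h
  | cons s ss ih =>
    intro t _
    cases ss with
    | nil => simp [prefAux]
    | cons s2 ss2 =>
      rw [show prefAux t (s :: s2 :: ss2) = (t+s) :: prefAux (t+s) (s2 :: ss2) from rfl]
      rw [show prefAux (t+s) (s2 :: ss2) = (t+s+s2) :: prefAux (t+s+s2) ss2 from rfl]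
      rw [List.getLast?_cons_cons]
      rw [show (t+s+s2) :: prefAux (t+s+s2) ss2 = prefAux (t+s) (s2 :: ss2) from rfl]
      rw [ih (t + s) (by simp)]
      simp only [List.sum_cons, Option.some.injEq]
      ring

theorem getD_set_self {α : Type} (l : List α) (n : Nat) (v d : α) (h : n < l.length) :
    (l.set n v).getD n d = v := by
  induction l generalizing n with
  | nil => simp at h
  | cons a t ih =>
    cases n with
    | zero => rfl
    | succ k => simpa [List.getD] using ih k (by simpa using h)

theorem drop_set_self {α : Type} (l : List α) (n : Nat) (v : α) (h : n < l.length) :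
    (l.set n v).drop n = v :: l.drop (n + 1) := by
  induction l generalizing n with
  | nil => simp at h
  | cons a t ih =>
    cases n with
    | zero => rfl
    | succ k => simpa using ih k (by simpa using h)

theorem take_succ_getD {α : Type} (l : List α) (n : Nat) (d : α) (h : n < l.length) :
    l.take (n + 1) = l.take n ++ [l.getD n d] := by
  induction l generalizing n with
  | nil => simp at h
  | cons a t ih =>
    cases n with
    | zero => rfl
    | succ k => simpa using ih k (by simpa using h)

-- A's backward pass: range(n-2,-1,-1) rewrites nums[j] := nums[j+1] - m*skill[j+1]
theorem bwd_go (m c : Int) (skill : List Int) : ∀ (t : Nat) (u : List Int),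
    1 ≤ t → t ≤ skill.length → u.length = skill.length →
    u.getD (t - 1) 0 = c + m * (prefAux 0 skill).getD (t - 1) 0 →
    (PySem.List.pyRange ((t : Int) - 2) (-1) (-1)).foldl
      (fun nums j =>
        PySem.List.pySetD nums j
          (PySem.List.pyGetD nums (j + 1) 0 - m * PySem.List.pyGetD skill (j + 1) 0))
      u
      = ((prefAux 0 skill).take (t - 1)).map (fun p => c + m * p) ++ u.drop (t - 1) := by
  intro t
  induction t with
  | zero => intro u h1 _ _ _; omega
  | succ t ih =>
    intro u h1 h2 h3 h4
    by_cases ht : t = 0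
    · subst ht
      rw [show ((1 : Nat) : Int) - 2 = -1 by norm_num,
          PySem.List.pyRange_neg_one_eq_nil (by norm_num)]
      simp
    · have ht1 : 1 ≤ t := Nat.one_le_iff_ne_zero.mpr ht
      have ha : (((t + 1 : Nat)) : Int) - 2 = ((t - 1 : Nat) : Int) := by omega
      have hlt : (-1 : Int) < ((t - 1 : Nat) : Int) := by omega
      rw [ha, PySem.List.pyRange_neg_one_cons hlt, List.foldl_cons]
      have hcast1 : ((t - 1 : Nat) : Int) + 1 = ((t : Nat) : Int) := by omega
      rw [hcast1, PySem.List.pySetD_natCast, PySem.List.pyGetD_natCast, PySem.List.pyGetD_natCast]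
      have hts : t < skill.length := by omega
      have hPsucc : (prefAux 0 skill).getD t 0
          = (prefAux 0 skill).getD (t - 1) 0 + skill.getD t 0 := by
        have h5 := prefAux_getD_succ skill 0 (t - 1) (by omega)
        rw [show t - 1 + 1 = t by omega] at h5
        exact h5
      have h4' : u.getD t 0 = c + m * (prefAux 0 skill).getD t 0 := by
        simpa using h4
      have hv : u.getD t 0 - m * skill.getD t 0
          = c + m * (prefAux 0 skill).getD (t - 1) 0 := by
        rw [h4', hPsucc]; ring
      rw [hv]
      have ihr := ih (u.set (t - 1) (c + m * (prefAux 0 skill).getD (t - 1) 0)) ht1 (by omega)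
        (by simpa using h3)
        (by rw [getD_set_self _ _ _ _ (by omega)])
      have hb : ((t - 1 : Nat) : Int) - 1 = ((t : Nat) : Int) - 2 := by omega
      rw [hb, ihr, drop_set_self _ _ _ (by omega), show t - 1 + 1 = t by omega]
      have htake : (prefAux 0 skill).take t
          = (prefAux 0 skill).take (t - 1) ++ [(prefAux 0 skill).getD (t - 1) 0] := by
        have h6 := take_succ_getD (prefAux 0 skill) (t - 1) (0 : Int)
          (by rw [length_prefAux]; omega)
        rw [show t - 1 + 1 = t by omega] at h6
        exact h6
      rw [show t + 1 - 1 = t by omega, htake]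
      simp

-- one potion step (i ≥ 1): A's forward-max pass plus backward correction equals
-- B's rebuild of done from start = max over k of done[k] - prefix[k-1]*m
theorem step_eq (m s0 : Int) (ss : List Int) (d : List Int) (hd : d.length = (s0 :: ss).length) :
    (PySem.List.pyRange ((((s0 :: ss).length : Nat) : Int) - 2) (-1) (-1)).foldl
      (fun nums j =>
        PySem.List.pySetD nums j
          (PySem.List.pyGetD nums (j + 1) 0 - m * PySem.List.pyGetD (s0 :: ss) (j + 1) 0))
      (((0, s0) :: PySem.List.enumerate ss (0 + 1)).foldl
        (fun nums jw =>
          if jw.1 == 0 then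
            PySem.List.pySetD nums jw.1 (PySem.List.pyGetD nums jw.1 0 + m * jw.2)
          else
            PySem.List.pySetD nums jw.1
              (max (PySem.List.pyGetD nums jw.1 0) (PySem.List.pyGetD nums (jw.1 - 1) 0) + m * jw.2)) d)
    = (prefAux 0 (s0 :: ss)).map (fun p =>
        ((PySem.List.pyRange 1 (((s0 :: ss).length : Nat) : Int) 1).foldl
          (fun start k =>
            max start
              (PySem.List.pyGetD d k 0 - PySem.List.pyGetD (prefAux 0 (s0 :: ss)) (k - 1) 0 * m))
          (PySem.List.pyGetD d 0 0)) + p * m) := by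
  obtain ⟨d0, ds, rfl⟩ : ∃ d0 ds, d = d0 :: ds := by
    cases d with
    | nil => simp at hd
    | cons d0 ds => exact ⟨d0, ds, rfl⟩
  have hds : ds.length = ss.length := by simpa using hd
  rw [List.foldl_cons]
  rw [show ((((0 : Int), s0).1 == 0) = true) from rfl]
  simp only [if_true]
  rw [show PySem.List.pySetD (d0 :: ds) ((0 : Int), s0).1
        (PySem.List.pyGetD (d0 :: ds) ((0 : Int), s0).1 0 + m * ((0 : Int), s0).2)
      = (d0 + m * s0) :: ds from by
    rw [show (((0 : Int), s0).1) = (0 : Int) from rfl, PySem.List.pyGetD_zero_cons,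
        show (0 : Int) = ((0 : Nat) : Int) from by norm_num, PySem.List.pySetD_natCast]
    rfl]
  rw [show ((0 : Int) + 1) = ((([d0 + m * s0] : List Int).length : Nat) : Int) from by simp]
  rw [show (d0 + m * s0) :: ds = [d0 + m * s0] ++ ds from rfl]
  rw [fwd_go m ss [d0 + m * s0] ds (by simp) hds]
  rw [show (([d0 + m * s0] : List Int).getLastD 0) = d0 + m * s0 from rfl]
  rw [List.singleton_append]
  have hlen : ((d0 + m * s0) :: fwdL m (d0 + m * s0) (ss.zip ds)).length = (s0 :: ss).length := by
    simp [length_fwdL, hds]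
  have hfne : ((d0 + m * s0) :: fwdL m (d0 + m * s0) (ss.zip ds)) ≠ [] := by simp
  have hFlast : ((d0 + m * s0) :: fwdL m (d0 + m * s0) (ss.zip ds)).getLast?
      = some ((ss.zip ds).foldl (fun c sr => max sr.2 c + m * sr.1) (d0 + m * s0)) :=
    getLast?_cons_fwdL m _ (d0 + m * s0)
  have hPne : prefAux 0 (s0 :: ss) ≠ [] := by
    rw [show prefAux 0 (s0 :: ss) = (0 + s0) :: prefAux (0 + s0) ss from rfl]; simp
  have hsum : (prefAux 0 (s0 :: ss)).getD ((s0 :: ss).length - 1) 0 = 0 + (s0 :: ss).sum := by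
    rw [show (s0 :: ss).length = (prefAux 0 (s0 :: ss)).length from (length_prefAux _ _).symm,
        getD_pred_eq_getLastD _ hPne, List.getLastD_eq_getLast?,
        prefAux_getLast? (s0 :: ss) 0 (by simp)]
    rfl
  have h4 : ((d0 + m * s0) :: fwdL m (d0 + m * s0) (ss.zip ds)).getD ((s0 :: ss).length - 1) 0
      = ((ss.zip ds).foldl (fun c sr => max sr.2 c + m * sr.1) (d0 + m * s0) - m * (0 + (s0 :: ss).sum))
        + m * (prefAux 0 (s0 :: ss)).getD ((s0 :: ss).length - 1) 0 := by
    rw [hsum, show (s0 :: ss).length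
          = ((d0 + m * s0) :: fwdL m (d0 + m * s0) (ss.zip ds)).length from hlen.symm,
        getD_pred_eq_getLastD _ hfne, List.getLastD_eq_getLast?, hFlast]
    simp only [Option.getD_some]
    ring
  rw [bwd_go m ((ss.zip ds).foldl (fun c sr => max sr.2 c + m * sr.1) (d0 + m * s0)
        - m * (0 + (s0 :: ss).sum)) (s0 :: ss) (s0 :: ss).length
      ((d0 + m * s0) :: fwdL m (d0 + m * s0) (ss.zip ds)) (by simp) (le_refl _) hlen h4]
  have hdrop : ((d0 + m * s0) :: fwdL m (d0 + m * s0) (ss.zip ds)).drop ((s0 :: ss).length - 1)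
      = [(ss.zip ds).foldl (fun c sr => max sr.2 c + m * sr.1) (d0 + m * s0)] := by
    rw [show (s0 :: ss).length
          = ((d0 + m * s0) :: fwdL m (d0 + m * s0) (ss.zip ds)).length from hlen.symm,
        drop_pred_eq_getLastD _ hfne 0, List.getLastD_eq_getLast?, hFlast]
    rfl
  rw [hdrop]
  -- rewrite B's start scan via bstart_go and fold_rel
  have hb := bstart_go m ss ds [d0] [0 + s0] (0 + s0) (PySem.List.pyGetD (d0 :: ds) 0 0)
    hds (by simp) (by simp)
  simp only [List.length_singleton, Nat.cast_one, List.singleton_append] at hb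
  rw [show ((0 + s0) :: prefAux (0 + s0) ss) = prefAux 0 (s0 :: ss) from rfl] at hb
  rw [show ((1 : Int) + (ss.length : Nat)) = (((s0 :: ss).length : Nat) : Int) from by
    simp; omega] at hb
  rw [hb]
  have hfr := fold_rel m (ss.zip ds) (PySem.List.pyGetD (d0 :: ds) 0 0) (0 + s0)
  rw [show (PySem.List.pyGetD (d0 :: ds) 0 0 + m * (0 + s0)) = d0 + m * s0 from by
    rw [PySem.List.pyGetD_zero_cons]; ring] at hfr
  rw [List.map_fst_zip (hds.symm.le)] at hfr
  have hc : (ss.zip ds).foldl (fun c sr => max sr.2 c + m * sr.1) (d0 + m * s0)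
        - m * (0 + (s0 :: ss).sum)
      = (annP m (0 + s0) (ss.zip ds)).foldl max (PySem.List.pyGetD (d0 :: ds) 0 0) := by
    rw [hfr]; simp only [List.sum_cons]; ring
  rw [hc]
  -- assemble: take (n-1) ++ [last] = whole prefix list
  have htake : (prefAux 0 (s0 :: ss)).take ((s0 :: ss).length - 1)
        ++ [(prefAux 0 (s0 :: ss)).getD ((s0 :: ss).length - 1) 0]
      = prefAux 0 (s0 :: ss) := by
    have h6 := take_succ_getD (prefAux 0 (s0 :: ss)) ((s0 :: ss).length - 1) (0 : Int)
      (by rw [length_prefAux]; simp)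
    rw [show (s0 :: ss).length - 1 + 1 = (s0 :: ss).length from by simp] at h6
    rw [← h6, show (s0 :: ss).length = (prefAux 0 (s0 :: ss)).length from (length_prefAux _ _).symm,
        List.take_length]
  have hFval : (ss.zip ds).foldl (fun c sr => max sr.2 c + m * sr.1) (d0 + m * s0)
      = (annP m (0 + s0) (ss.zip ds)).foldl max (PySem.List.pyGetD (d0 :: ds) 0 0)
        + m * ((prefAux 0 (s0 :: ss)).getD ((s0 :: ss).length - 1) 0) := by
    rw [hsum, hfr]
    simp only [List.sum_cons]
    ring
  rw [hFval]
  rw [show [(annP m (0 + s0) (ss.zip ds)).foldl max (PySem.List.pyGetD (d0 :: ds) 0 0)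
        + m * ((prefAux 0 (s0 :: ss)).getD ((s0 :: ss).length - 1) 0)]
      = List.map (fun p => (annP m (0 + s0) (ss.zip ds)).foldl max (PySem.List.pyGetD (d0 :: ds) 0 0)
          + m * p) [(prefAux 0 (s0 :: ss)).getD ((s0 :: ss).length - 1) 0] from rfl]
  rw [← List.map_append, htake]
  exact List.map_congr_left (fun a _ => by ring)

theorem enum_cons_at {α : Type} (x : α) (xs : List α) (st : Int) :
    PySem.List.enumerate (x :: xs) st = (st, x) :: PySem.List.enumerate xs (st + 1) :=
  PySem.List.enumerate_cons x xs st

theorem main_go (s0 : Int) (ss : List Int) : ∀ (rest : List Int) (i0 : Int) (d : List Int),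
    1 ≤ i0 → d.length = (s0 :: ss).length →
    (PySem.List.enumerate rest i0).foldl
      (fun nums ip =>
        if ip.1 == 0 then
          ((0, s0) :: PySem.List.enumerate ss (0 + 1)).foldl
            (fun nums jw =>
              PySem.List.pySetD nums jw.1 (jw.2 * ip.2 + PySem.List.pyGetD nums (jw.1 - 1) 0)) nums
        else
          (PySem.List.pyRange ((((s0 :: ss).length : Nat) : Int) - 2) (-1) (-1)).foldl
            (fun nums j =>
              PySem.List.pySetD nums j
                (PySem.List.pyGetD nums (j + 1) 0 - ip.2 * PySem.List.pyGetD (s0 :: ss) (j + 1) 0))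
            (((0, s0) :: PySem.List.enumerate ss (0 + 1)).foldl
              (fun nums jw =>
                if jw.1 == 0 then
                  PySem.List.pySetD nums jw.1 (PySem.List.pyGetD nums jw.1 0 + ip.2 * jw.2)
                else
                  PySem.List.pySetD nums jw.1
                    (max (PySem.List.pyGetD nums jw.1 0) (PySem.List.pyGetD nums (jw.1 - 1) 0)
                      + ip.2 * jw.2)) nums)) d
    = rest.foldl
      (fun done m =>
        (prefAux 0 (s0 :: ss)).map (fun p =>
          ((PySem.List.pyRange 1 (((s0 :: ss).length : Nat) : Int) 1).foldl
            (fun start k =>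
              max start
                (PySem.List.pyGetD done k 0
                  - PySem.List.pyGetD (prefAux 0 (s0 :: ss)) (k - 1) 0 * m))
            (PySem.List.pyGetD done 0 0)) + p * m)) d := by
  intro rest
  induction rest with
  | nil => intro i0 d _ _; simp [PySem.List.enumerate_nil]
  | cons m rest' ih =>
    intro i0 d hi0 hd
    rw [enum_cons_at m rest' i0, List.foldl_cons, List.foldl_cons]
    have hif : ((i0, m).1 == 0) = false := by
      simp only [beq_eq_false_iff_ne, ne_eq]
      omega
    rw [hif]
    simp only [Bool.false_eq_true, if_false]
    rw [step_eq m s0 ss d hd]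
    exact ih (i0 + 1) _ (by omega) (by simp [length_prefAux])

-- ===== VERDICT (by name: the statement is the Claim_ definition above) =====
theorem minTimeOptimal_spec : Claim_equal_minTimeOptimal := by
  intro skill mana _ hpre
  unfold Spec_minTimeOptimal
  obtain ⟨s0, ss, rfl⟩ : ∃ s0 ss, skill = s0 :: ss := by
    cases skill with
    | nil => exact absurd rfl hpre
    | cons s0 ss => exact ⟨s0, ss, rfl⟩
  cases mana with
  | nil =>
    simp only [minTimeOptimal, minTimeOptimal_alt]
    rw [PySem.List.enumerate_nil, List.foldl_nil]
    have hne : List.replicate (s0 :: ss).length (0 : Int) ≠ [] := by simp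
    rw [PySem.List.pyGetD_neg_one (h := hne)]
    exact List.eq_of_mem_replicate (List.getLast_mem hne)
  | cons m0 rest =>
    simp only [minTimeOptimal, minTimeOptimal_alt]
    rw [show (s0 :: ss).foldl (fun (acc : List Int × Int) s => (acc.1 ++ [acc.2 + s], acc.2 + s)) ([], 0)
          = ([] ++ prefAux 0 (s0 :: ss), 0 + (s0 :: ss).sum) from bprefix_fold _ _ _]
    simp only [List.nil_append]
    rw [enum_cons_at m0 rest 0, List.foldl_cons]
    rw [show ((((0 : Int), m0).1 == 0) = true) from rfl]
    simp only [if_true]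
    rw [show List.replicate (s0 :: ss).length (0 : Int) = 0 :: List.replicate ss.length 0 from rfl]
    rw [enum_cons_at s0 ss 0, List.foldl_cons]
    have hne : (0 :: List.replicate ss.length (0 : Int)) ≠ [] := by simp
    have e1 : PySem.List.pySetD (0 :: List.replicate ss.length (0 : Int)) ((0 : Int), s0).1
        (((0 : Int), s0).2 * m0
          + PySem.List.pyGetD (0 :: List.replicate ss.length (0 : Int)) (((0 : Int), s0).1 - 1) 0)
        = [s0 * m0 + 0] ++ List.replicate ss.length 0 := by
      rw [show (((0 : Int), s0).1 - 1) = (-1 : Int) from by norm_num]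
      rw [PySem.List.pyGetD_neg_one (h := hne)]
      rw [show (0 :: List.replicate ss.length (0 : Int)).getLast hne = 0 from
            List.eq_of_mem_replicate (n := ss.length + 1) (List.getLast_mem hne)]
      rw [show (((0 : Int), s0).1) = (0 : Int) from rfl,
          show (0 : Int) = ((0 : Nat) : Int) from by norm_num, PySem.List.pySetD_natCast]
      rfl
    have e2 : (PySem.List.enumerate ss ((0 : Int) + 1)).foldl
        (fun nums jw => PySem.List.pySetD nums jw.1 (jw.2 * m0 + PySem.List.pyGetD nums (jw.1 - 1) 0))
        ([s0 * m0 + 0] ++ List.replicate ss.length 0)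
        = (prefAux 0 (s0 :: ss)).map (fun p => p * m0) := by
      rw [show ((0 : Int) + 1) = ((([s0 * m0 + 0] : List Int).length : Nat) : Int) from by simp]
      rw [first_go m0 ss [s0 * m0 + 0] (List.replicate ss.length 0) (by simp) (by simp)]
      rw [show (([s0 * m0 + 0] : List Int)).getLastD 0 = s0 * m0 + 0 from rfl]
      rw [List.singleton_append]
      rw [show prefAux 0 (s0 :: ss) = (0 + s0) :: prefAux (0 + s0) ss from rfl, List.map_cons]
      rw [show s0 * m0 + 0 = (0 + s0) * m0 from by ring, firstL_pref]
    rw [e1, e2]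
    rw [main_go s0 ss rest (0 + 1) ((prefAux 0 (s0 :: ss)).map (fun p => p * m0))
        (by norm_num) (by simp [length_prefAux])]
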